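-- pv_equiv track=rewrite | github.com/PixelHacksII-EssayGrading/Model | essay+grading.py | captErrors
-- ===== SOURCE A (Python) =====
-- def captErrors(essay):
--     errors=0
--     sents=essay.split('.')
--     for i in range(len(sents)-1):
--         sent=sents[i]
--         if len(sent)>2:
--             if sent[1]==sent[1].lower():
--                 errors+=1
--     return errors
-- ===== SOURCE B (Python) =====
-- def captErrors(essay):
--     errors = 0
--     pos = 0        # length of the current (not yet terminated) segment
--     second = ' '   # character at index 1 of the current segment (valid once pos >= 2)
--     for ch in essay:
--         if ch == '.':
--             if pos > 2 and second == second.lower():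
--                 errors += 1
--             pos = 0
--         else:
--             if pos == 1:
--                 second = ch
--             pos += 1
--     return errors
-- ===== Notes on version B (the rewrite author's own statement) =====
-- stated objective: alternative
-- what changed: B replaces period-splitting plus an indexed loop over the segment list with a single character scan that keeps only the running segment length and its second character, finalizing a segment at each period and never materializing the split list.
import Mathlib
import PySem

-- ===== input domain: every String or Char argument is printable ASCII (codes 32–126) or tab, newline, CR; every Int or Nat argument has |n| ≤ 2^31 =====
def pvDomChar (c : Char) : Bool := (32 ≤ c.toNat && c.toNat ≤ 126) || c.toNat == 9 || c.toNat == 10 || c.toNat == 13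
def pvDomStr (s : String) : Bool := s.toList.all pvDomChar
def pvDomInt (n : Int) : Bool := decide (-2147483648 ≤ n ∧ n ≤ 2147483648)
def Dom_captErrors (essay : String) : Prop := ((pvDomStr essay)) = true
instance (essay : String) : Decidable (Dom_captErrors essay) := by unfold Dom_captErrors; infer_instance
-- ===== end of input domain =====

-- B replaces period-splitting + an indexed loop over the segment list by a single character scan
-- keeping only the running segment length and its second character (objective: alternative).

-- ===== PORT A =====
-- A-side helper: the loop body. sent[1] == sent[1].lower() compares a one-character string
-- with its lowercase form; ported exactly as the char at index 1 vs PySem.Chars.lowerChar.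
def stepA (errors : Int) (sent : List Char) : Int :=
  if 2 < sent.length then
    if PySem.List.pyGetD sent 1 ' ' == PySem.Chars.lowerChar (PySem.List.pyGetD sent 1 ' ')
    then errors + 1 else errors
  else errors

def captErrors (essay : String) : Int :=
  let sents := PySem.Chars.splitOn essay.toList ['.']
  (PySem.List.pyRange 0 ((sents.length : Int) - 1) 1).foldl
    (fun errors i => stepA errors (PySem.List.pyGetD sents i [])) 0

-- ===== PORT B =====
-- B-side helper: the scan body; state = (errors, pos = current segment length,
-- second = char at index 1 of the current segment, valid once pos ≥ 2)
def stepB (st : Int × Nat × Char) (ch : Char) : Int × Nat × Char :=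
  if ch == '.' then
    (if 2 < st.2.1 && st.2.2 == PySem.Chars.lowerChar st.2.2 then st.1 + 1 else st.1, 0, st.2.2)
  else
    (st.1, st.2.1 + 1, if st.2.1 == 1 then ch else st.2.2)

def captErrors_alt (essay : String) : Int :=
  (essay.toList.foldl stepB (0, 0, ' ')).1

-- ===== PRECONDITION & SPEC =====
def Spec_captErrors (essay : String) (out : Int) : Prop := out = captErrors_alt essay
instance (essay : String) (out : Int) : Decidable (Spec_captErrors essay out) := by unfold Spec_captErrors; infer_instance

-- ===== CLAIM (what is proved, stated in full; the proofs are below) =====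
def Claim_equal_captErrors : Prop := ∀ (essay : String), Dom_captErrors essay → Spec_captErrors essay (captErrors essay)

-- ===== LEMMAS AND PROOFS =====

/-- The per-segment test both programs apply. -/
def pSeg (seg : List Char) : Bool :=
  decide (2 < seg.length) && (seg.getD 1 ' ' == PySem.Chars.lowerChar (seg.getD 1 ' '))

/-- Simple recursive description of splitting on '.', with accumulator `cur`
(the current segment, reversed). -/
def segs (l cur : List Char) : List (List Char) :=
  match l with
  | [] => [cur.reverse]
  | c :: rest => if c = '.' then cur.reverse :: segs rest [] else segs rest (c :: cur)

theorem segs_ne_nil (l cur : List Char) : segs l cur ≠ [] := by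
  cases l with
  | nil => simp [segs]
  | cons c rest => simp only [segs]; split <;> simp [segs_ne_nil]

theorem splitOn_go_eq (l : List Char) : ∀ (fuel : Nat) (cur : List Char)
    (acc : List (List Char)), l.length < fuel →
    PySem.Chars.splitOn.go ['.'] fuel l cur acc = acc.reverse ++ segs l cur := by
  induction l with
  | nil =>
    intro fuel cur acc h
    obtain ⟨f, rfl⟩ : ∃ f, fuel = f + 1 := ⟨fuel - 1, by omega⟩
    rw [PySem.Chars.splitOn.go] <;> simp [segs]
  | cons c rest ih =>
    intro fuel cur acc h
    obtain ⟨f, rfl⟩ : ∃ f, fuel = f + 1 := ⟨fuel - 1, by omega⟩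
    rw [PySem.Chars.splitOn.go]
    by_cases hc : c = '.'
    · subst hc
      rw [if_pos (by simp)]
      show PySem.Chars.splitOn.go ['.'] f rest [] (cur.reverse :: acc) = _
      rw [ih f [] (cur.reverse :: acc) (by simp at h; omega)]
      simp [segs]
    · rw [if_neg (by simp; exact fun h' => hc h'.symm)]
      rw [ih f (c :: cur) acc (by simp at h; omega)]
      simp [segs, hc]

theorem splitOn_eq_segs (l : List Char) :
    PySem.Chars.splitOn l ['.'] = segs l [] := by
  rw [PySem.Chars.splitOn, splitOn_go_eq l (l.length + 1) [] [] (by omega)]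
  simp

/-- A's loop body over any list of segments counts `pSeg`. -/
theorem foldA_eq_countP (xs : List (List Char)) (e : Int) :
    xs.foldl stepA e = e + (xs.countP pSeg : Int) := by
  induction xs generalizing e with
  | nil => simp
  | cons s xs ih =>
    rw [List.foldl_cons, ih, List.countP_cons]
    unfold stepA
    rw [PySem.List.pyGetD_ofNat' s 1 ' ']
    by_cases h1 : 2 < s.length
    · by_cases h2 : (s.getD 1 ' ' == PySem.Chars.lowerChar (s.getD 1 ' ')) = true
      · have hp : pSeg s = true := by simp only [pSeg]; rw [h2]; simp [h1]
        rw [if_pos h1, if_pos h2, hp]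
        push_cast
        simp only [if_true]
        ring
      · have h2' : (s.getD 1 ' ' == PySem.Chars.lowerChar (s.getD 1 ' ')) = false := by
          simpa using h2
        have hp : pSeg s = false := by simp only [pSeg]; rw [h2']; simp
        rw [if_pos h1, if_neg h2, hp]
        push_cast
        ring
    · have hp : pSeg s = false := by simp only [pSeg]; simp [h1]
      rw [if_neg h1, hp]
      push_cast
      ring

theorem dropLast_cons_of_ne_nil {α : Type} (a : α) {xs : List α} (h : xs ≠ []) :
    (a :: xs).dropLast = a :: xs.dropLast := by
  cases xs with
  | nil => exact absurd rfl h
  | cons b ys => rfl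

/-- Main invariant: B's scan over `l`, started with a state describing the partial
segment `cur` (reversed), adds the `pSeg`-count of the finalized segments. -/
theorem scanB_eq (l : List Char) : ∀ (cur : List Char) (e : Int) (second : Char),
    (2 ≤ cur.length → second = cur.reverse.getD 1 ' ') →
    (l.foldl stepB (e, cur.length, second)).1 =
      e + (((segs l cur).dropLast).countP pSeg : Int) := by
  induction l with
  | nil => intro cur e second _; simp [segs]
  | cons c rest ih =>
    intro cur e second hinv
    by_cases hc : c = '.'
    · subst hc
      rw [List.foldl_cons,
        show stepB (e, cur.length, second) '.' =
          ((if decide (2 < cur.length) && (second == PySem.Chars.lowerChar second)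
            then e + 1 else e), 0, second) from by simp [stepB]]
      have hih := ih [] (if decide (2 < cur.length) && (second == PySem.Chars.lowerChar second)
          then e + 1 else e) second (by intro h; simp at h)
      simp only [List.length_nil] at hih
      rw [hih, show segs ('.' :: rest) cur = cur.reverse :: segs rest [] from by simp [segs],
        dropLast_cons_of_ne_nil _ (segs_ne_nil rest []), List.countP_cons]
      have hps : pSeg cur.reverse = (decide (2 < cur.length) &&
          (second == PySem.Chars.lowerChar second)) := by
        by_cases h2 : 2 < cur.length
        · rw [hinv (by omega)]; simp [pSeg, h2]
        · simp [pSeg, h2]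
      rw [hps]
      by_cases hb : (decide (2 < cur.length) && (second == PySem.Chars.lowerChar second)) = true <;>
        simp [hb] <;> omega
    · rw [List.foldl_cons,
        show stepB (e, cur.length, second) c =
          (e, cur.length + 1, if cur.length == 1 then c else second) from by
            simp [stepB, hc]]
      have hinv' : 2 ≤ (c :: cur).length →
          (if cur.length == 1 then c else second) = (c :: cur).reverse.getD 1 ' ' := by
        intro h2
        by_cases h1 : cur.length = 1
        · obtain ⟨x, rfl⟩ : ∃ x, cur = [x] := by
            cases cur with
            | nil => simp at h1
            | cons a t => cases t with
              | nil => exact ⟨a, rfl⟩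
              | cons b u => simp at h1
          simp
        · have h2' : 2 ≤ cur.length := by simp at h2; omega
          rw [show (if cur.length == 1 then c else second) = second from by simp [h1],
            hinv h2']
          simp only [List.reverse_cons]
          rw [List.getD_append _ _ _ 1 (by simp; omega)]
      have hih := ih (c :: cur) e (if cur.length == 1 then c else second) hinv'
      simp only [List.length_cons] at hih
      rw [hih, show segs (c :: rest) cur = segs rest (c :: cur) from by simp [segs, hc]]

-- ===== VERDICT (by name: the statement is the Claim_ definition above) =====
theorem captErrors_spec : Claim_equal_captErrors := by
  intro essay _
  unfold Spec_captErrors captErrors_alt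
  simp only [captErrors]
  have hB := scanB_eq essay.toList [] 0 ' ' (by intro h; simp at h)
  simp only [List.length_nil] at hB
  rw [hB]
  have hS1 : 1 ≤ (PySem.Chars.splitOn essay.toList ['.']).length := by
    rw [splitOn_eq_segs]
    cases h : segs essay.toList [] with
    | nil => exact absurd h (segs_ne_nil _ _)
    | cons a t => simp
  have hcongr := PySem.List.foldl_congr_mem
      (PySem.List.pyRange 0 (((PySem.Chars.splitOn essay.toList ['.']).length : Int) - 1))
      (fun errors i => stepA errors (PySem.List.pyGetD (PySem.Chars.splitOn essay.toList ['.']) i []))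
      (fun errors i => stepA errors (PySem.List.pyGetD (PySem.Chars.splitOn essay.toList ['.']).dropLast i []))
      0 ?side
  case side =>
    intro acc i hi
    rw [PySem.List.mem_pyRange_one] at hi
    have h0 := hi.1
    have h1 : i < ((PySem.Chars.splitOn essay.toList ['.']).length : Int) - 1 := hi.2
    simp only
    rw [PySem.List.pyGetD_eq_getElem _ _ h0 (by omega),
        PySem.List.pyGetD_eq_getElem _ _ h0 (by simp [List.length_dropLast]; omega),
        List.getElem_dropLast]
  rw [hcongr]
  rw [show ((PySem.Chars.splitOn essay.toList ['.']).length : Int) - 1 =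
        ((PySem.Chars.splitOn essay.toList ['.']).dropLast.length : Int) from by
          simp [List.length_dropLast]; omega]
  rw [PySem.List.foldl_pyRange_zero_pyGetD' _ [] stepA 0]
  rw [foldA_eq_countP, splitOn_eq_segs]
  try ring
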